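-- pv_equiv track=rewrite | github.com/a1029/algorithm | ndb_chap03/큰수의법칙.py | solution
-- ===== SOURCE A (Python) =====
-- from typing import List
--
-- def solution(n, m, k, array: List[int]):
--
--     array.sort()
--     first = array[-1]
--     second = array[-2]
--     result = 0
--     while True:
--         for i in range(k):
--             if m==0:
--                 break
--             result += first
--             m-=1
--         if m==0:
--             break
--         result += second
--         m-=1
--     return result
-- ===== SOURCE B (Python) =====
-- def solution(n, m, k, array):
--     array.sort()
--     first = array[-1]
--     second = array[-2]
--     if k <= 0:
--         return m * second
--     q, r = divmod(m, k + 1)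
--     return q * (k * first + second) + r * first
-- ===== Notes on version B (the rewrite author's own statement) =====
-- stated objective: simpler
-- what changed: Replaces the while/for simulation that adds one element per step with closed-form arithmetic over the m // (k+1) repeating cycles of k firsts plus one second.
-- outside the precondition, e.g. on solution(5, -1, 2, [1, 2, 3, 4, 5]): A does not finish within the time limit, B returns -4; on solution(1, 3, 2, [7]): A raises IndexError, B raises IndexError
import Mathlib
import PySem

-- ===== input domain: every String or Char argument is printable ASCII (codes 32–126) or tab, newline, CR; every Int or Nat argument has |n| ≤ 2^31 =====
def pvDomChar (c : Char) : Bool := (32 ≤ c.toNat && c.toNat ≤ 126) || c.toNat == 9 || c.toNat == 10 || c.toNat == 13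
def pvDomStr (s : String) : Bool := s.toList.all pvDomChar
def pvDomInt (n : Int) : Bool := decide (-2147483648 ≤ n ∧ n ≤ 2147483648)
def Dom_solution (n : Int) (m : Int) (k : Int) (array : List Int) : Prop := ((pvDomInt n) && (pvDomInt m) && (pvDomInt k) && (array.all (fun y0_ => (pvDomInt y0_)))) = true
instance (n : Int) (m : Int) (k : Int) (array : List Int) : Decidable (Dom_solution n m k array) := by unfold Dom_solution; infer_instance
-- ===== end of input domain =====

-- B replaces A's element-by-element while/for loop by closed-form arithmetic over the
-- m // (k+1) cycles (k × first then second). Equivalence is about the RETURN value only: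
-- both A and B sort `array` in place.

-- ===== PORT A =====
-- inner `for i in range(k)` loop: returns the updated (m, result)
def pvInnerA (first : Int) (cnt : Nat) (m result : Int) : Int × Int :=
  match cnt with
  | 0 => (m, result)
  | c + 1 => if m = 0 then (m, result) else pvInnerA first c (m - 1) (result + first)

-- outer `while True` loop; fuel only makes the recursion total (m decreases by ≥ 1 per
-- non-final iteration when m ≥ 0, so fuel = m.toNat + 1 suffices inside Pre_)
def pvOuterA (first second k : Int) (fuel : Nat) (m result : Int) : Int :=
  match fuel with
  | 0 => result
  | f + 1 =>
    let p := pvInnerA first k.toNat m result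
    if p.1 = 0 then p.2 else pvOuterA first second k f (p.1 - 1) (p.2 + second)

def solution (n : Int) (m : Int) (k : Int) (array : List Int) : Int :=
  let arr := PySem.List.sorted array (fun x => x) false
  let first := PySem.List.pyGetD arr (-1) 0
  let second := PySem.List.pyGetD arr (-2) 0
  pvOuterA first second k (m.toNat + 1) m 0

-- ===== PORT B =====
def solution_alt (n : Int) (m : Int) (k : Int) (array : List Int) : Int :=
  let arr := PySem.List.sorted array (fun x => x) false
  let first := PySem.List.pyGetD arr (-1) 0
  let second := PySem.List.pyGetD arr (-2) 0
  if k ≤ 0 then m * second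
  else
    let q := PySem.Int.floordiv m (k + 1)
    let r := PySem.Int.mod m (k + 1)
    q * (k * first + second) + r * first

-- ===== PRECONDITION & SPEC =====
-- Pre_ excludes m < 0 (A's while loop never terminates there) and lists with fewer than
-- two elements (array[-2] raises IndexError).
def Pre_solution (n : Int) (m : Int) (k : Int) (array : List Int) : Prop :=
  0 ≤ m ∧ 2 ≤ array.length
instance (n : Int) (m : Int) (k : Int) (array : List Int) : Decidable (Pre_solution n m k array) := by unfold Pre_solution; infer_instance
def pvWitness_solution : Int × Int × Int × List Int := (2, 8, 3, [2, 4, 5, 4, 6])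

def Spec_solution (n : Int) (m : Int) (k : Int) (array : List Int) (out : Int) : Prop := out = solution_alt n m k array
instance (n : Int) (m : Int) (k : Int) (array : List Int) (out : Int) : Decidable (Spec_solution n m k array out) := by unfold Spec_solution; infer_instance

-- ===== CLAIM (what is proved, stated in full; the proofs are below) =====
def Claim_equal_solution : Prop := ∀ (n : Int) (m : Int) (k : Int) (array : List Int), Dom_solution n m k array → Pre_solution n m k array → Spec_solution n m k array (solution n m k array)

-- ===== LEMMAS AND PROOFS =====

-- the inner for-loop adds `first` min(cnt, m) times and decreases m accordingly
lemma pvInnerA_spec (f : Int) (c : Nat) (m r : Int) (hm : 0 ≤ m) :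
    pvInnerA f c m r =
      if m ≤ (c : Int) then (0, r + m * f) else (m - c, r + c * f) := by
  induction c generalizing m r with
  | zero =>
    simp only [pvInnerA, Nat.cast_zero]
    split_ifs with h
    · have : m = 0 := le_antisymm h hm
      simp [this]
    · simp
  | succ c ih =>
    simp only [pvInnerA]
    by_cases h0 : m = 0
    · subst h0
      rw [if_pos rfl, if_pos (by push_cast; omega)]
      simp
    · rw [if_neg h0, ih (m - 1) (r + f) (by omega)]
      push_cast
      split_ifs with h1 h2 h2 <;> [skip; omega; omega; skip] <;>
        · exact Prod.ext (by omega) (by ring)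

lemma pvOuterA_k_nonpos (f s k : Int) (hk : k ≤ 0) (fuel : Nat) (m r : Int)
    (hm : 0 ≤ m) (hf : m < (fuel : Int)) :
    pvOuterA f s k fuel m r = r + m * s := by
  induction fuel generalizing m r with
  | zero => omega
  | succ fl ih =>
    have hk0 : k.toNat = 0 := by omega
    simp only [pvOuterA, hk0, pvInnerA]
    by_cases h0 : m = 0
    · simp [h0]
    · rw [if_neg h0, ih (m - 1) (r + s) (by omega) (by push_cast at hf ⊢; omega)]
      ring

lemma pvOuterA_k_pos (f s k : Int) (hk : 0 < k) (fuel : Nat) (m r : Int)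
    (hm : 0 ≤ m) (hf : m < (fuel : Int)) :
    pvOuterA f s k fuel m r =
      r + m / (k + 1) * (k * f + s) + m % (k + 1) * f := by
  induction fuel generalizing m r with
  | zero => omega
  | succ fl ih =>
    have hck : ((k.toNat : Nat) : Int) = k := by omega
    simp only [pvOuterA, pvInnerA_spec f k.toNat m r hm, hck]
    by_cases hle : m ≤ k
    · rw [if_pos hle]
      have hdiv : m / (k + 1) = 0 := Int.ediv_eq_zero_of_lt hm (by omega)
      have hmod : m % (k + 1) = m := Int.emod_eq_of_lt hm (by omega)
      simp [hdiv, hmod]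
    · rw [if_neg hle]
      have hne : m - k ≠ 0 := by omega
      rw [if_neg hne,
        ih (m - k - 1) (r + k * f + s) (by omega) (by push_cast at hf ⊢; omega)]
      have e1 : m - k - 1 = m - (k + 1) := by ring
      have h2 : (m - (k + 1)) / (k + 1) = m / (k + 1) - 1 := by
        have := Int.add_mul_ediv_right (m - (k + 1)) 1 (show k + 1 ≠ 0 by omega)
        simp at this
        omega
      have h3 : (m - (k + 1)) % (k + 1) = m % (k + 1) :=
        Int.sub_emod_right m (k + 1)
      rw [e1, h2, h3]
      ring

-- ===== VERDICT (by name: the statement is the Claim_ definition above) =====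
theorem solution_spec : Claim_equal_solution := by
  intro n m k array _ hpre
  obtain ⟨hm, _⟩ := hpre
  unfold Spec_solution solution solution_alt
  by_cases hk : k ≤ 0
  · rw [if_pos hk, pvOuterA_k_nonpos _ _ _ hk _ _ _ hm (by push_cast; omega)]
    ring
  · rw [if_neg hk, pvOuterA_k_pos _ _ _ (by omega) _ _ _ hm (by push_cast; omega)]
    rw [PySem.Int.floordiv_eq_ediv_of_pos (by omega), PySem.Int.mod_eq_emod_of_pos (by omega)]
    ring
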